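-- pv_equiv track=rewrite | github.com/trungkien1992/AstraTrade-Project | gitingest_scripts/auto_digest_task.py | _get_primary_language
-- ===== SOURCE A (Python) =====
-- from typing import List, Dict, Optional
--
-- def _get_primary_language(changes: Dict[str, List[str]]) -> str:
--     """Determine the primary language of changes."""
--     all_files = []
--     for files in changes.values():
--         all_files.extend(files)
--
--     if any(f.endswith('.dart') for f in all_files):
--         return 'Dart/Flutter'
--     elif any(f.endswith('.py') for f in all_files):
--         return 'Python'
--     elif any(f.endswith('.md') for f in all_files):
--         return 'Documentation'
--     else:
--         return 'Configuration'
-- ===== SOURCE B (Python) =====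
-- def _get_primary_language(changes):
--     """Determine the primary language of changes: one pass collecting flags."""
--     dart = py = md = False
--     for files in changes.values():
--         for f in files:
--             dart = dart or f.endswith('.dart')
--             py = py or f.endswith('.py')
--             md = md or f.endswith('.md')
--     if dart:
--         return 'Dart/Flutter'
--     if py:
--         return 'Python'
--     if md:
--         return 'Documentation'
--     return 'Configuration'
-- ===== Notes on version B (the rewrite author's own statement) =====
-- stated objective: simpler
-- what changed: Instead of flattening all files into one list and scanning it three times with any(), B makes a single pass over the files maintaining three boolean flags and picks the answer by priority afterwards.
import Mathlib
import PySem

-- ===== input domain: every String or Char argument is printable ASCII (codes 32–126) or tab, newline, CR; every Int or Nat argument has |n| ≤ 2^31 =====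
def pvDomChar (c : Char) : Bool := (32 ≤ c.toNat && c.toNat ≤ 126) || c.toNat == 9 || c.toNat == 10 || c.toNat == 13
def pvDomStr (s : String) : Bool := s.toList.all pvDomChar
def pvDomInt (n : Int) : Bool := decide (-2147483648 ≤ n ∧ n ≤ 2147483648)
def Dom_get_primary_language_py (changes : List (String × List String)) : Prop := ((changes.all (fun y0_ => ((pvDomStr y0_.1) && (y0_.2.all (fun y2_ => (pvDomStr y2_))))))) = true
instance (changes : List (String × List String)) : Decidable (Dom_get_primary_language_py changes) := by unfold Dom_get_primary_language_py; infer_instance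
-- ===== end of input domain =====

-- B replaces A's flatten-then-three-any()-scans by one pass keeping three boolean flags (objective: simpler).

-- ===== PORT A =====
def get_primary_language_py (changes : List (String × List String)) : String :=
  let all_files := changes.foldl (fun acc kv => acc ++ kv.2) []
  if all_files.any (fun f => PySem.Str.endswith f ".dart") then "Dart/Flutter"
  else if all_files.any (fun f => PySem.Str.endswith f ".py") then "Python"
  else if all_files.any (fun f => PySem.Str.endswith f ".md") then "Documentation"
  else "Configuration"

-- ===== PORT B =====
def pvAltStep (st : Bool × Bool × Bool) (f : String) : Bool × Bool × Bool :=
  (st.1 || PySem.Str.endswith f ".dart",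
   st.2.1 || PySem.Str.endswith f ".py",
   st.2.2 || PySem.Str.endswith f ".md")

def get_primary_language_py_alt (changes : List (String × List String)) : String :=
  let st := changes.foldl (fun st kv => kv.2.foldl pvAltStep st) (false, false, false)
  if st.1 then "Dart/Flutter"
  else if st.2.1 then "Python"
  else if st.2.2 then "Documentation"
  else "Configuration"

-- ===== PRECONDITION & SPEC =====
def Spec_get_primary_language_py (changes : List (String × List String)) (out : String) : Prop := out = get_primary_language_py_alt changes
instance (changes : List (String × List String)) (out : String) : Decidable (Spec_get_primary_language_py changes out) := by unfold Spec_get_primary_language_py; infer_instance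

-- ===== CLAIM (what is proved, stated in full; the proofs are below) =====
def Claim_equal_get_primary_language_py : Prop := ∀ (changes : List (String × List String)), Dom_get_primary_language_py changes → Spec_get_primary_language_py changes (get_primary_language_py changes)

-- ===== LEMMAS AND PROOFS =====

theorem pv_foldl_step (files : List String) (d p m : Bool) :
    files.foldl pvAltStep (d, p, m) =
      (d || files.any (fun f => PySem.Str.endswith f ".dart"),
       p || files.any (fun f => PySem.Str.endswith f ".py"),
       m || files.any (fun f => PySem.Str.endswith f ".md")) := by
  induction files generalizing d p m with
  | nil => simp
  | cons x xs ih =>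
    simp only [List.foldl_cons, List.any_cons, pvAltStep]
    rw [ih]
    simp [Bool.or_assoc]

theorem pv_foldl_changes (changes : List (String × List String)) (d p m : Bool) :
    changes.foldl (fun st kv => kv.2.foldl pvAltStep st) (d, p, m) =
      (d || (changes.flatMap Prod.snd).any (fun f => PySem.Str.endswith f ".dart"),
       p || (changes.flatMap Prod.snd).any (fun f => PySem.Str.endswith f ".py"),
       m || (changes.flatMap Prod.snd).any (fun f => PySem.Str.endswith f ".md")) := by
  induction changes generalizing d p m with
  | nil => simp
  | cons kv rest ih =>
    simp only [List.foldl_cons]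
    rw [pv_foldl_step, ih]
    simp [Bool.or_assoc]

-- ===== VERDICT (by name: the statement is the Claim_ definition above) =====
theorem get_primary_language_py_spec : Claim_equal_get_primary_language_py := by
  intro changes _
  unfold Spec_get_primary_language_py get_primary_language_py get_primary_language_py_alt
  rw [pv_foldl_changes, PySem.List.foldl_append_eq_flatMap]
  simp only [List.nil_append, Bool.false_or]
  rfl
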